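-- pv_equiv track=rewrite | github.com/VaHiX/CodeForces | Python/ByRound/2074/2074_G_Game_With_Triangles_Season_2.py | max_triangle_score
-- ===== SOURCE A (Python) =====
-- def max_triangle_score(n, a):
--     # DP table initialized to 0
--     dp = [[0] * (n + 1) for _ in range(n)]
--
--     # Iterating over segment lengths
--     for k in range(3, n + 1):
--         for l in range(n - k + 1):
--             r = l + k
--             cur = max(dp[l + 1][r], dp[l][r - 1])
--             for m in range(l + 1, r):
--                 cur = max(cur, dp[l][m] + dp[m][r])
--                 if m < r - 1:
--                     cur = max(
--                         cur, dp[l + 1][m] + dp[m + 1][r - 1] + a[l] * a[m] * a[r - 1]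
--                     )
--             dp[l][r] = cur
--
--     return dp[0][n]
-- ===== SOURCE B (Python) =====
-- def max_triangle_score(n, a):
--     # Top-down memoized recursion over intervals instead of a bottom-up table.
--     memo = {}
--
--     def solve(l, r):
--         if r - l < 3:
--             return 0
--         key = (l, r)
--         v = memo.get(key)
--         if v is not None:
--             return v
--         cur = max(solve(l + 1, r), solve(l, r - 1))
--         al = a[l]
--         ar = a[r - 1]
--         r1 = r - 1
--         for m in range(l + 1, r):
--             cur = max(cur, solve(l, m) + solve(m, r))
--             if m < r1:
--                 cur = max(cur, solve(l + 1, m) + solve(m + 1, r1) + al * a[m] * ar)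
--         memo[key] = cur
--         return cur
--
--     return solve(0, n)
-- ===== Notes on version B (the rewrite author's own statement) =====
-- stated objective: alternative
-- what changed: The bottom-up length-ordered DP table is replaced by a top-down memoized recursion solve(l, r) over intervals, with a dict cache instead of the 2D list.
import Mathlib
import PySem

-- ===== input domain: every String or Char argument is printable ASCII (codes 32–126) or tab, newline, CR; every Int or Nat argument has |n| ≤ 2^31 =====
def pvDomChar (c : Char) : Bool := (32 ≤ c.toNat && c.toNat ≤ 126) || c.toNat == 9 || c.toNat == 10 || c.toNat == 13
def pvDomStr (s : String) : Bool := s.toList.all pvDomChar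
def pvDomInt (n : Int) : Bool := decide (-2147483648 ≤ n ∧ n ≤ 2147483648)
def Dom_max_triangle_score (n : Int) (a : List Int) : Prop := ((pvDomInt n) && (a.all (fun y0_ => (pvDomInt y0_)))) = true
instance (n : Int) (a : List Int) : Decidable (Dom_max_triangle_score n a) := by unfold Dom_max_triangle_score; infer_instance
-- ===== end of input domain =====

-- B replaces A's bottom-up interval-DP table by a top-down memoized recursion over intervals
-- (same recurrence, different decomposition); equivalence is proved on Pre_ (where Python A returns).

-- ===== PORT A =====
-- a[i] — all accesses are in range under Pre_, so the defaulted read is exact there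
def tsAget (a : List Int) (i : Int) : Int := PySem.List.pyGetD a i 0
-- dp[i][j] read / write (in range under Pre_, where they are exact)
def tsDget (dp : List (List Int)) (i j : Int) : Int :=
  PySem.List.pyGetD (PySem.List.pyGetD dp i []) j 0
def tsDset (dp : List (List Int)) (i j : Int) (v : Int) : List (List Int) :=
  PySem.List.pySetD dp i (PySem.List.pySetD (PySem.List.pyGetD dp i []) j v)

def max_triangle_score (n : Int) (a : List Int) : Int :=
  let dp0 : List (List Int) :=
    (PySem.List.pyRange 0 n 1).map (fun _ => List.replicate (n + 1).toNat (0 : Int))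
  let dp := (PySem.List.pyRange 3 (n + 1) 1).foldl (fun dp k =>
    (PySem.List.pyRange 0 (n - k + 1) 1).foldl (fun dp l =>
      tsDset dp l (l + k)
        ((PySem.List.pyRange (l + 1) (l + k) 1).foldl (fun cur m =>
            if m < l + k - 1 then
              max (max cur (tsDget dp l m + tsDget dp m (l + k)))
                (tsDget dp (l + 1) m + tsDget dp (m + 1) (l + k - 1) +
                  tsAget a l * tsAget a m * tsAget a (l + k - 1))
            else max cur (tsDget dp l m + tsDget dp m (l + k)))
          (max (tsDget dp (l + 1) (l + k)) (tsDget dp l (l + k - 1))))) dp) dp0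
  tsDget dp 0 n

-- ===== PORT B =====
-- solve(l, r) with the memo dict threaded through; fuel ≥ r - l at every call
-- (the fuel-0 branch is a totality guard only, never reached from max_triangle_score_alt)
def tsSolve (a : List Int) :
    Nat → Int → Int → PySem.Dict (Int × Int) Int → Int × PySem.Dict (Int × Int) Int
  | fuel, l, r, memo =>
    if r - l < 3 then (0, memo)
    else
      match memo.get? (l, r) with
      | some v => (v, memo)
      | none =>
        match fuel with
        | 0 => (0, memo)
        | f + 1 =>
          let p1 := tsSolve a f (l + 1) r memo
          let p2 := tsSolve a f l (r - 1) p1.2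
          let al := tsAget a l
          let ar := tsAget a (r - 1)
          let r1 := r - 1
          let st := (PySem.List.pyRange (l + 1) r 1).foldl (fun st m =>
            let q1 := tsSolve a f l m st.2
            let q2 := tsSolve a f m r q1.2
            if m < r1 then
              let q3 := tsSolve a f (l + 1) m q2.2
              let q4 := tsSolve a f (m + 1) r1 q3.2
              (max (max st.1 (q1.1 + q2.1))
                (q3.1 + q4.1 + al * tsAget a m * ar), q4.2)
            else (max st.1 (q1.1 + q2.1), q2.2)) (max p1.1 p2.1, p2.2)
          (st.1, st.2.insert (l, r) st.1)

def max_triangle_score_alt (n : Int) (a : List Int) : Int :=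
  (tsSolve a n.toNat 0 n PySem.Dict.empty).1

-- ===== PRECONDITION & SPEC =====
-- Pre_ excludes exactly where Python A raises IndexError: n ≤ 0 (dp[0][n] on an empty table)
-- and 3 ≤ n > len(a) (a[l] out of range).
def Pre_max_triangle_score (n : Int) (a : List Int) : Prop :=
  1 ≤ n ∧ (n ≤ 2 ∨ n ≤ a.length)
instance (n : Int) (a : List Int) : Decidable (Pre_max_triangle_score n a) := by
  unfold Pre_max_triangle_score; infer_instance
def pvWitness_max_triangle_score : Int × List Int := (4, [1, 2, 3, 4])

def Spec_max_triangle_score (n : Int) (a : List Int) (out : Int) : Prop :=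
  out = max_triangle_score_alt n a
instance (n : Int) (a : List Int) (out : Int) : Decidable (Spec_max_triangle_score n a out) := by
  unfold Spec_max_triangle_score; infer_instance

-- ===== CLAIM (what is proved, stated in full; the proofs are below) =====
def Claim_equal_max_triangle_score : Prop :=
  ∀ (n : Int) (a : List Int), Dom_max_triangle_score n a → Pre_max_triangle_score n a →
    Spec_max_triangle_score n a (max_triangle_score n a)
-- ===== LEMMAS AND PROOFS =====

-- Pure (memo-free, fuel-indexed) value of an interval: the common specification of both ports.
def tsG (a : List Int) : Nat → Int → Int → Int
  | 0, _, _ => 0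
  | f + 1, l, r =>
    if r - l < 3 then 0
    else
      (PySem.List.pyRange (l + 1) r 1).foldl (fun cur m =>
        if m < r - 1 then
          max (max cur (tsG a f l m + tsG a f m r))
            (tsG a f (l + 1) m + tsG a f (m + 1) (r - 1) +
              tsAget a l * tsAget a m * tsAget a (r - 1))
        else max cur (tsG a f l m + tsG a f m r))
        (max (tsG a f (l + 1) r) (tsG a f l (r - 1)))

theorem tsG_base (a : List Int) (f : Nat) (l r : Int) (h : r - l < 3) : tsG a f l r = 0 := by
  cases f <;> simp [tsG, h]

theorem tsG_mono (a : List Int) : ∀ (f1 f2 : Nat) (l r : Int),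
    (r - l).toNat ≤ f1 → (r - l).toNat ≤ f2 → tsG a f1 l r = tsG a f2 l r := by
  intro f1
  induction f1 with
  | zero =>
    intro f2 l r h1 _
    rw [tsG_base a 0 l r (by omega), tsG_base a f2 l r (by omega)]
  | succ f ih =>
    intro f2 l r h1 h2
    by_cases hb : r - l < 3
    · rw [tsG_base a _ l r hb, tsG_base a f2 l r hb]
    · have hrl : 3 ≤ r - l := by omega
      obtain ⟨f2', rfl⟩ : ∃ f2', f2 = f2' + 1 := ⟨f2 - 1, by omega⟩
      show tsG a (f + 1) l r = tsG a (f2' + 1) l r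
      simp only [tsG, if_neg hb]
      have hsub : ∀ x y : Int, l ≤ x → y ≤ r → y - x ≤ r - l - 1 →
          tsG a f x y = tsG a f2' x y := by
        intro x y _ _ hlen
        exact ih f2' x y (by omega) (by omega)
      rw [hsub (l + 1) r (by omega) (by omega) (by omega),
          hsub l (r - 1) (by omega) (by omega) (by omega)]
      apply PySem.List.foldl_congr_mem
      intro acc m hm
      rw [PySem.List.mem_pyRange_one] at hm
      rw [hsub l m (by omega) (by omega) (by omega),
          hsub m r (by omega) (by omega) (by omega)]
      by_cases hmr : m < r - 1
      · rw [if_pos hmr, if_pos hmr,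
            hsub (l + 1) m (by omega) (by omega) (by omega),
            hsub (m + 1) (r - 1) (by omega) (by omega) (by omega)]
      · rw [if_neg hmr, if_neg hmr]

-- every value stored in the memo is the pure value of its interval
def MemoOK (a : List Int) (memo : PySem.Dict (Int × Int) Int) : Prop :=
  ∀ (l r v : Int), memo.get? (l, r) = some v → v = tsG a (r - l).toNat l r

theorem tsSolve_correct (a : List Int) : ∀ (fuel : Nat) (l r : Int)
    (memo : PySem.Dict (Int × Int) Int), (r - l).toNat ≤ fuel → MemoOK a memo →
    (tsSolve a fuel l r memo).1 = tsG a (r - l).toNat l r ∧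
      MemoOK a (tsSolve a fuel l r memo).2 := by
  intro fuel
  induction fuel with
  | zero =>
    intro l r memo h1 hm
    have hb : r - l < 3 := by omega
    simp only [tsSolve, if_pos hb]
    exact ⟨(tsG_base a _ l r hb).symm, hm⟩
  | succ f ih =>
    intro l r memo h1 hm
    by_cases hb : r - l < 3
    · simp only [tsSolve, if_pos hb]
      exact ⟨(tsG_base a _ l r hb).symm, hm⟩
    · cases hget : memo.get? (l, r) with
      | some v =>
        simp only [tsSolve, if_neg hb, hget]
        exact ⟨hm l r v hget, hm⟩
      | none =>
        have hg1 : (r - l).toNat = ((r - l).toNat - 1) + 1 := by omega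
        set g : Nat := (r - l).toNat - 1 with hgdef
        have hgf : g ≤ f := by omega
        -- any strict subinterval's solve value is the pure value at fuel g
        have hsub : ∀ (x y : Int) (memo' : PySem.Dict (Int × Int) Int), MemoOK a memo' →
            l ≤ x → y ≤ r → y - x ≤ r - l - 1 →
            (tsSolve a f x y memo').1 = tsG a g x y ∧ MemoOK a (tsSolve a f x y memo').2 := by
          intro x y memo' hm' _ _ hlen
          obtain ⟨hv, hmo⟩ := ih x y memo' (by omega) hm'
          exact ⟨hv.trans (tsG_mono a _ g x y (le_refl _) (by omega)), hmo⟩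
        have hfold : ∀ (L : List Int), (∀ m ∈ L, l + 1 ≤ m ∧ m < r) →
            ∀ (c : Int) (memo' : PySem.Dict (Int × Int) Int), MemoOK a memo' →
            (L.foldl (fun st m =>
              let q1 := tsSolve a f l m st.2
              let q2 := tsSolve a f m r q1.2
              if m < r - 1 then
                let q3 := tsSolve a f (l + 1) m q2.2
                let q4 := tsSolve a f (m + 1) (r - 1) q3.2
                (max (max st.1 (q1.1 + q2.1))
                  (q3.1 + q4.1 + tsAget a l * tsAget a m * tsAget a (r - 1)), q4.2)
              else (max st.1 (q1.1 + q2.1), q2.2)) (c, memo')).1 =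
              L.foldl (fun cur m =>
                if m < r - 1 then
                  max (max cur (tsG a g l m + tsG a g m r))
                    (tsG a g (l + 1) m + tsG a g (m + 1) (r - 1) +
                      tsAget a l * tsAget a m * tsAget a (r - 1))
                else max cur (tsG a g l m + tsG a g m r)) c ∧
            MemoOK a (L.foldl (fun st m =>
              let q1 := tsSolve a f l m st.2
              let q2 := tsSolve a f m r q1.2
              if m < r - 1 then
                let q3 := tsSolve a f (l + 1) m q2.2
                let q4 := tsSolve a f (m + 1) (r - 1) q3.2
                (max (max st.1 (q1.1 + q2.1))
                  (q3.1 + q4.1 + tsAget a l * tsAget a m * tsAget a (r - 1)), q4.2)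
              else (max st.1 (q1.1 + q2.1), q2.2)) (c, memo')).2 := by
          intro L
          induction L with
          | nil => intro _ c memo' hm'; exact ⟨rfl, hm'⟩
          | cons m T ihL =>
            intro hmem c memo' hm'
            obtain ⟨hml, hmr⟩ := hmem m (List.mem_cons_self ..)
            obtain ⟨hq1, hm1⟩ := hsub l m memo' hm' (by omega) (by omega) (by omega)
            obtain ⟨hq2, hm2⟩ := hsub m r _ hm1 (by omega) (by omega) (by omega)
            simp only [List.foldl_cons]
            by_cases hmR : m < r - 1
            · obtain ⟨hq3, hm3⟩ := hsub (l + 1) m _ hm2 (by omega) (by omega) (by omega)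
              obtain ⟨hq4, hm4⟩ := hsub (m + 1) (r - 1) _ hm3 (by omega) (by omega) (by omega)
              simp only [if_pos hmR, hq1, hq2, hq3, hq4]
              exact ihL (fun x hx => hmem x (List.mem_cons_of_mem _ hx)) _ _ hm4
            · simp only [if_neg hmR, hq1, hq2]
              exact ihL (fun x hx => hmem x (List.mem_cons_of_mem _ hx)) _ _ hm2
        obtain ⟨hp1, hm1⟩ := hsub (l + 1) r memo hm (by omega) (by omega) (by omega)
        obtain ⟨hp2, hm2⟩ := hsub l (r - 1) _ hm1 (by omega) (by omega) (by omega)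
        obtain ⟨hf1, hf2⟩ := hfold (PySem.List.pyRange (l + 1) r 1)
          (fun m hmm => (PySem.List.mem_pyRange_one.mp hmm))
          (max (tsSolve a f (l + 1) r memo).1
            (tsSolve a f l (r - 1) (tsSolve a f (l + 1) r memo).2).1)
          (tsSolve a f l (r - 1) (tsSolve a f (l + 1) r memo).2).2 hm2
        have hval : (tsG a (r - l).toNat l r) =
            (PySem.List.pyRange (l + 1) r 1).foldl (fun cur m =>
              if m < r - 1 then
                max (max cur (tsG a g l m + tsG a g m r))
                  (tsG a g (l + 1) m + tsG a g (m + 1) (r - 1) +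
                    tsAget a l * tsAget a m * tsAget a (r - 1))
              else max cur (tsG a g l m + tsG a g m r))
              (max (tsG a g (l + 1) r) (tsG a g l (r - 1))) := by
          rw [hg1]; simp only [tsG, if_neg hb]
        have hres : (tsSolve a (f + 1) l r memo).1 = tsG a (r - l).toNat l r := by
          simp only [tsSolve, if_neg hb, hget]
          exact hf1.trans (by rw [hp1, hp2]; exact hval.symm)
        have hmem2 : MemoOK a (tsSolve a (f + 1) l r memo).2 := by
          intro l' r' v hv
          simp only [tsSolve, if_neg hb, hget] at hv
          rw [PySem.Dict.get?_insert] at hv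
          by_cases hk : (l', r') = (l, r)
          · rw [if_pos hk] at hv
            obtain ⟨h1', h2'⟩ := Prod.mk.injEq .. ▸ hk
            subst h1'; subst h2'
            have hxv := (Option.some.injEq ..).mp hv
            have := hres
            simp only [tsSolve, if_neg hb, hget] at this
            rw [← hxv]
            exact this
          · rw [if_neg hk] at hv
            exact hf2 l' r' v hv
        exact ⟨hres, hmem2⟩

-- ----- A side -----
def tsShape (n : Int) (dp : List (List Int)) : Prop :=
  dp.length = n.toNat ∧ ∀ row ∈ dp, row.length = (n + 1).toNat

def tsInTab (n i j : Int) : Prop := 0 ≤ i ∧ i < n ∧ 0 ≤ j ∧ j ≤ n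

-- table invariant: entries in P hold the pure value, all others are still 0
def tsTabInv (n : Int) (a : List Int) (P : Int → Int → Prop) (dp : List (List Int)) : Prop :=
  ∀ i j : Int, 0 ≤ i → 0 ≤ j →
    (P i j → tsDget dp i j = tsG a (j - i).toNat i j) ∧ (¬ P i j → tsDget dp i j = 0)

theorem tsTabInv_congr (n : Int) (a : List Int) (P Q : Int → Int → Prop)
    (dp : List (List Int)) (h : ∀ i j : Int, 0 ≤ i → 0 ≤ j → (P i j ↔ Q i j))
    (hP : tsTabInv n a P dp) : tsTabInv n a Q dp := by
  intro i j hi hj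
  obtain ⟨h1, h2⟩ := hP i j hi hj
  exact ⟨fun hq => h1 ((h i j hi hj).2 hq), fun hq => h2 (fun hp => hq ((h i j hi hj).1 hp))⟩

theorem tsGetD_out {α : Type} (xs : List α) (i : Int) (d : α) (h : (xs.length : Int) ≤ i) :
    PySem.List.pyGetD xs i d = d := by
  apply PySem.List.pyGetD_of_none
  rw [PySem.List.pyGet?_eq_none_iff]
  intro hr
  unfold PySem.Raise.InRange at hr
  omega

theorem tsGetD_set {α : Type} (xs : List α) (m : Nat) (v : α) (j : Int) (d : α)
    (hj : 0 ≤ j) (hm : m < xs.length) :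
    PySem.List.pyGetD (xs.set m v) j d = if j = (m : Int) then v else PySem.List.pyGetD xs j d := by
  by_cases hjl : j < (xs.length : Int)
  · rw [PySem.List.pyGetD_eq_getElem _ d hj (by simpa [List.length_set] using hjl),
        List.getElem_set]
    by_cases hjm : j = (m : Int)
    · rw [if_pos hjm, if_pos (by omega)]
    · rw [if_neg (by omega), if_neg hjm,
          PySem.List.pyGetD_eq_getElem _ d hj (by simpa using hjl)]
  · rw [if_neg (by omega), tsGetD_out _ _ _ (by simp [List.length_set]; omega),
        tsGetD_out _ _ _ (by omega)]

theorem tsRow_mem (n : Int) (dp : List (List Int)) (hs : tsShape n dp) (l : Int)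
    (hl : 0 ≤ l) (hln : l < n) : (PySem.List.pyGetD dp l []).length = (n + 1).toNat := by
  apply hs.2
  apply PySem.List.pyGetD_mem
  unfold PySem.Raise.InRange
  have := hs.1
  omega

theorem tsShape_dset (n : Int) (dp : List (List Int)) (l r v : Int) (hs : tsShape n dp)
    (hl : 0 ≤ l) (hln : l < n) (hr : 0 ≤ r) : tsShape n (tsDset dp l r v) := by
  unfold tsDset
  rw [PySem.List.pySetD_of_nonneg _ _ hl, PySem.List.pySetD_of_nonneg _ _ hr]
  refine ⟨by simp [List.length_set, hs.1], ?_⟩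
  intro row hrow
  rcases List.mem_or_eq_of_mem_set hrow with h | h
  · exact hs.2 row h
  · rw [h, List.length_set]
    exact tsRow_mem n dp hs l hl hln

theorem tsDget_dset (n : Int) (dp : List (List Int)) (l r v i j : Int) (hs : tsShape n dp)
    (hl : 0 ≤ l) (hln : l < n) (hr : 0 ≤ r) (hrn : r ≤ n) (hi : 0 ≤ i) (hj : 0 ≤ j) :
    tsDget (tsDset dp l r v) i j = if i = l ∧ j = r then v else tsDget dp i j := by
  unfold tsDset tsDget
  rw [PySem.List.pySetD_of_nonneg _ _ hl, PySem.List.pySetD_of_nonneg _ _ hr]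
  have hlen : dp.length = n.toNat := hs.1
  have hrow : (PySem.List.pyGetD dp l []).length = (n + 1).toNat := tsRow_mem n dp hs l hl hln
  rw [tsGetD_set dp l.toNat _ i [] hi (by omega)]
  by_cases hil : i = (l.toNat : Int)
  · rw [if_pos hil]
    rw [tsGetD_set _ r.toNat v j 0 hj (by omega)]
    by_cases hjr : j = (r.toNat : Int)
    · rw [if_pos hjr, if_pos (by omega)]
    · rw [if_neg hjr, if_neg (by omega)]
      have : i = l := by omega
      rw [this]
  · rw [if_neg hil, if_neg (by omega)]

theorem tsDget_dp0 (n : Int) (i j : Int) (hi : 0 ≤ i) (hj : 0 ≤ j) :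
    tsDget ((PySem.List.pyRange 0 n 1).map (fun _ => List.replicate (n + 1).toNat (0 : Int))) i j
      = 0 := by
  unfold tsDget
  by_cases hin : i < n
  · rw [PySem.List.pyGetD_map_pyRange_of_nonneg _ n i _ hi hin]
    by_cases hjn : j < ((List.replicate (n + 1).toNat (0 : Int)).length : Int)
    · rw [PySem.List.pyGetD_eq_getElem _ _ hj hjn, List.getElem_replicate]
    · exact tsGetD_out _ _ _ (by omega)
  · rw [tsGetD_out _ i []
      (by simp [PySem.List.length_pyRange_one]; omega)]
    exact tsGetD_out _ _ _ (by simp; omega)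

theorem tsShape_dp0 (n : Int) :
    tsShape n ((PySem.List.pyRange 0 n 1).map (fun _ => List.replicate (n + 1).toNat (0 : Int))) := by
  constructor
  · simp [PySem.List.length_pyRange_one]
  · intro row hrow
    obtain ⟨_, _, rfl⟩ := List.mem_map.mp hrow
    simp

-- the inner m-loop of port A computes the pure value of the interval [l, l+k]
theorem tsCur_eq (n k l : Int) (a : List Int) (dp : List (List Int)) (hs : tsShape n dp)
    (h3 : 3 ≤ k) (hkn : k ≤ n) (hl : 0 ≤ l) (hlk : l ≤ n - k)
    (hinv : tsTabInv n a
      (fun i j => tsInTab n i j ∧ (j - i ≤ k - 1 ∨ (j - i = k ∧ i < l))) dp) :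
    ((PySem.List.pyRange (l + 1) (l + k) 1).foldl (fun cur m =>
        if m < l + k - 1 then
          max (max cur (tsDget dp l m + tsDget dp m (l + k)))
            (tsDget dp (l + 1) m + tsDget dp (m + 1) (l + k - 1) +
              tsAget a l * tsAget a m * tsAget a (l + k - 1))
        else max cur (tsDget dp l m + tsDget dp m (l + k)))
      (max (tsDget dp (l + 1) (l + k)) (tsDget dp l (l + k - 1))))
      = tsG a k.toNat l (l + k) := by
  have hg1 : k.toNat = (k.toNat - 1) + 1 := by omega
  set g : Nat := k.toNat - 1 with hgdef
  have hread : ∀ x y : Int, l ≤ x → x < n → 0 ≤ y → y ≤ l + k → y - x ≤ k - 1 →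
      tsDget dp x y = tsG a g x y := by
    intro x y hx hxn hy hyk hyx
    have h := (hinv x y (by omega) hy).1
      ⟨⟨by omega, hxn, hy, by omega⟩, Or.inl hyx⟩
    exact h.trans (tsG_mono a _ g x y (le_refl _) (by omega))
  have hval : tsG a k.toNat l (l + k) =
      (PySem.List.pyRange (l + 1) (l + k) 1).foldl (fun cur m =>
        if m < l + k - 1 then
          max (max cur (tsG a g l m + tsG a g m (l + k)))
            (tsG a g (l + 1) m + tsG a g (m + 1) (l + k - 1) +
              tsAget a l * tsAget a m * tsAget a (l + k - 1))
        else max cur (tsG a g l m + tsG a g m (l + k)))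
        (max (tsG a g (l + 1) (l + k)) (tsG a g l (l + k - 1))) := by
    rw [hg1]
    simp only [tsG, if_neg (show ¬(l + k - l < 3) by omega)]
  rw [hval,
      hread (l + 1) (l + k) (by omega) (by omega) (by omega) (by omega) (by omega),
      hread l (l + k - 1) (by omega) (by omega) (by omega) (by omega) (by omega)]
  apply PySem.List.foldl_congr_mem
  intro acc m hm
  rw [PySem.List.mem_pyRange_one] at hm
  rw [hread l m (by omega) (by omega) (by omega) (by omega) (by omega),
      hread m (l + k) (by omega) (by omega) (by omega) (by omega) (by omega)]
  by_cases hmr : m < l + k - 1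
  · rw [if_pos hmr, if_pos hmr,
        hread (l + 1) m (by omega) (by omega) (by omega) (by omega) (by omega),
        hread (m + 1) (l + k - 1) (by omega) (by omega) (by omega) (by omega) (by omega)]
  · rw [if_neg hmr, if_neg hmr]

-- one iteration of the l-loop extends the invariant from slot l to slot l + 1
theorem tsUpdate (n k l : Int) (a : List Int) (dp : List (List Int)) (hs : tsShape n dp)
    (h3 : 3 ≤ k) (hkn : k ≤ n) (hl : 0 ≤ l) (hlk : l ≤ n - k)
    (hinv : tsTabInv n a
      (fun i j => tsInTab n i j ∧ (j - i ≤ k - 1 ∨ (j - i = k ∧ i < l))) dp) :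
    tsShape n (tsDset dp l (l + k)
      ((PySem.List.pyRange (l + 1) (l + k) 1).foldl (fun cur m =>
        if m < l + k - 1 then
          max (max cur (tsDget dp l m + tsDget dp m (l + k)))
            (tsDget dp (l + 1) m + tsDget dp (m + 1) (l + k - 1) +
              tsAget a l * tsAget a m * tsAget a (l + k - 1))
        else max cur (tsDget dp l m + tsDget dp m (l + k)))
      (max (tsDget dp (l + 1) (l + k)) (tsDget dp l (l + k - 1))))) ∧
    tsTabInv n a
      (fun i j => tsInTab n i j ∧ (j - i ≤ k - 1 ∨ (j - i = k ∧ i < l + 1)))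
      (tsDset dp l (l + k)
      ((PySem.List.pyRange (l + 1) (l + k) 1).foldl (fun cur m =>
        if m < l + k - 1 then
          max (max cur (tsDget dp l m + tsDget dp m (l + k)))
            (tsDget dp (l + 1) m + tsDget dp (m + 1) (l + k - 1) +
              tsAget a l * tsAget a m * tsAget a (l + k - 1))
        else max cur (tsDget dp l m + tsDget dp m (l + k)))
      (max (tsDget dp (l + 1) (l + k)) (tsDget dp l (l + k - 1))))) := by
  have hcur := tsCur_eq n k l a dp hs h3 hkn hl hlk hinv
  constructor
  · exact tsShape_dset n dp l (l + k) _ hs hl (by omega) (by omega)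
  · intro i j hi hj
    rw [tsDget_dset n dp l (l + k) _ i j hs hl (by omega) (by omega) (by omega) hi hj]
    by_cases hij : i = l ∧ j = l + k
    · rw [if_pos hij]
      obtain ⟨rfl, rfl⟩ := hij
      constructor
      · intro _
        rw [hcur]
        congr 1
        omega
      · intro hnp
        exact absurd ⟨⟨hl, by omega, by omega, by omega⟩, Or.inr ⟨by omega, by omega⟩⟩ hnp
    · rw [if_neg hij]
      obtain ⟨h1, h2⟩ := hinv i j hi hj
      unfold tsInTab at h1 h2 ⊢
      have hdir : ∀ hh : j - i ≤ k - 1 ∨ (j - i = k ∧ i < l + 1),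
          j - i ≤ k - 1 ∨ (j - i = k ∧ i < l) := by
        rintro (h | h)
        · exact Or.inl h
        · right
          refine ⟨h.1, ?_⟩
          by_cases hil : i = l
          · exact absurd ⟨hil, by omega⟩ hij
          · omega
      constructor
      · intro hp
        exact h1 ⟨hp.1, hdir hp.2⟩
      · intro hnp
        apply h2
        intro hp
        have hdir2 : ∀ hh : j - i ≤ k - 1 ∨ (j - i = k ∧ i < l),
            j - i ≤ k - 1 ∨ (j - i = k ∧ i < l + 1) := by
          rintro (h | h)
          · exact Or.inl h
          · exact Or.inr ⟨h.1, by omega⟩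
        exact hnp ⟨hp.1, hdir2 hp.2⟩

-- the l-loop from lo establishes the full length-≤-k invariant
theorem tsLoopL (n k : Int) (a : List Int) (h3 : 3 ≤ k) (hkn : k ≤ n) :
    ∀ (cnt : Nat) (lo : Int), 0 ≤ lo → (n - k + 1 - lo).toNat = cnt →
    ∀ dp : List (List Int), tsShape n dp →
    tsTabInv n a (fun i j => tsInTab n i j ∧ (j - i ≤ k - 1 ∨ (j - i = k ∧ i < lo))) dp →
    tsShape n ((PySem.List.pyRange lo (n - k + 1) 1).foldl (fun dp l =>
      tsDset dp l (l + k)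
        ((PySem.List.pyRange (l + 1) (l + k) 1).foldl (fun cur m =>
            if m < l + k - 1 then
              max (max cur (tsDget dp l m + tsDget dp m (l + k)))
                (tsDget dp (l + 1) m + tsDget dp (m + 1) (l + k - 1) +
                  tsAget a l * tsAget a m * tsAget a (l + k - 1))
            else max cur (tsDget dp l m + tsDget dp m (l + k)))
          (max (tsDget dp (l + 1) (l + k)) (tsDget dp l (l + k - 1))))) dp) ∧
    tsTabInv n a (fun i j => tsInTab n i j ∧ j - i ≤ k)
      ((PySem.List.pyRange lo (n - k + 1) 1).foldl (fun dp l =>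
      tsDset dp l (l + k)
        ((PySem.List.pyRange (l + 1) (l + k) 1).foldl (fun cur m =>
            if m < l + k - 1 then
              max (max cur (tsDget dp l m + tsDget dp m (l + k)))
                (tsDget dp (l + 1) m + tsDget dp (m + 1) (l + k - 1) +
                  tsAget a l * tsAget a m * tsAget a (l + k - 1))
            else max cur (tsDget dp l m + tsDget dp m (l + k)))
          (max (tsDget dp (l + 1) (l + k)) (tsDget dp l (l + k - 1))))) dp) := by
  intro cnt
  induction cnt with
  | zero =>
    intro lo hlo hcnt dp hs hinv
    rw [PySem.List.pyRange_one_eq_nil (by omega)]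
    refine ⟨hs, tsTabInv_congr n a _ _ dp ?_ hinv⟩
    intro i j hi hj
    unfold tsInTab
    constructor
    · rintro ⟨ht, h | h⟩ <;> exact ⟨ht, by omega⟩
    · rintro ⟨ht, h⟩
      refine ⟨ht, ?_⟩
      by_cases hk : j - i ≤ k - 1
      · exact Or.inl hk
      · exact Or.inr ⟨by omega, by obtain ⟨_, _, _, _⟩ := ht; omega⟩
  | succ c ih =>
    intro lo hlo hcnt dp hs hinv
    rw [PySem.List.pyRange_one_cons (by omega), List.foldl_cons]
    obtain ⟨hs', hinv'⟩ := tsUpdate n k lo a dp hs h3 hkn hlo (by omega) hinv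
    exact ih (lo + 1) (by omega) (by omega) _ hs' hinv'

-- the k-loop from k0 + 1 establishes the full invariant
theorem tsLoopK (n : Int) (a : List Int) :
    ∀ (cnt : Nat) (k0 : Int), 2 ≤ k0 → (n - k0).toNat = cnt →
    ∀ dp : List (List Int), tsShape n dp →
    tsTabInv n a (fun i j => tsInTab n i j ∧ j - i ≤ k0) dp →
    tsTabInv n a (fun i j => tsInTab n i j ∧ j - i ≤ n)
      ((PySem.List.pyRange (k0 + 1) (n + 1) 1).foldl (fun dp k =>
        (PySem.List.pyRange 0 (n - k + 1) 1).foldl (fun dp l =>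
          tsDset dp l (l + k)
            ((PySem.List.pyRange (l + 1) (l + k) 1).foldl (fun cur m =>
                if m < l + k - 1 then
                  max (max cur (tsDget dp l m + tsDget dp m (l + k)))
                    (tsDget dp (l + 1) m + tsDget dp (m + 1) (l + k - 1) +
                      tsAget a l * tsAget a m * tsAget a (l + k - 1))
                else max cur (tsDget dp l m + tsDget dp m (l + k)))
              (max (tsDget dp (l + 1) (l + k)) (tsDget dp l (l + k - 1))))) dp) dp) := by
  intro cnt
  induction cnt with
  | zero =>
    intro k0 hk0 hcnt dp hs hinv
    rw [PySem.List.pyRange_one_eq_nil (by omega)]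
    refine tsTabInv_congr n a _ _ dp ?_ hinv
    intro i j hi hj
    unfold tsInTab
    constructor
    · rintro ⟨ht, h⟩; exact ⟨ht, by obtain ⟨_, _, _, _⟩ := ht; omega⟩
    · rintro ⟨ht, h⟩; exact ⟨ht, by obtain ⟨_, _, _, _⟩ := ht; omega⟩
  | succ c ih =>
    intro k0 hk0 hcnt dp hs hinv
    rw [PySem.List.pyRange_one_cons (by omega), List.foldl_cons]
    have hinv0 : tsTabInv n a
        (fun i j => tsInTab n i j ∧ (j - i ≤ (k0 + 1) - 1 ∨ (j - i = k0 + 1 ∧ i < 0))) dp := by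
      refine tsTabInv_congr n a _ _ dp ?_ hinv
      intro i j hi hj
      constructor
      · rintro ⟨ht, h⟩; exact ⟨ht, Or.inl (by omega)⟩
      · rintro ⟨ht, h | h⟩
        · exact ⟨ht, by omega⟩
        · omega
    obtain ⟨hs', hinv'⟩ := tsLoopL n (k0 + 1) a (by omega) (by omega)
      (n - (k0 + 1) + 1 - 0).toNat 0 (by omega) rfl dp hs hinv0
    exact ih (k0 + 1) (by omega) (by omega) _ hs' hinv'

theorem tsSolve_top (n : Int) (a : List Int) (hn : 3 ≤ n) :
    max_triangle_score_alt n a = tsG a n.toNat 0 n := by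
  have hmemo : MemoOK a PySem.Dict.empty := by
    intro l r v hv
    rw [PySem.Dict.get?_empty] at hv
    simp at hv
  have h := tsSolve_correct a n.toNat 0 n PySem.Dict.empty (by omega) hmemo
  unfold max_triangle_score_alt
  rw [h.1]
  congr 1
  omega

theorem main_equiv (n : Int) (a : List Int) (hn : 1 ≤ n) :
    max_triangle_score n a = max_triangle_score_alt n a := by
  by_cases hn3 : n < 3
  · unfold max_triangle_score
    rw [show PySem.List.pyRange 3 (n + 1) 1 = [] from PySem.List.pyRange_one_eq_nil (by omega)]
    simp only [List.foldl_nil]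
    rw [tsDget_dp0 n 0 n (by omega) (by omega)]
    have hmemo : MemoOK a PySem.Dict.empty := by
      intro l r v hv
      rw [PySem.Dict.get?_empty] at hv
      simp at hv
    have h := tsSolve_correct a n.toNat 0 n PySem.Dict.empty (by omega) hmemo
    unfold max_triangle_score_alt
    rw [h.1, tsG_base a _ 0 n (by omega)]
  · have hbase : tsTabInv n a (fun i j => tsInTab n i j ∧ j - i ≤ 2)
        ((PySem.List.pyRange 0 n 1).map (fun _ => List.replicate (n + 1).toNat (0 : Int))) := by
      intro i j hi hj
      rw [tsDget_dp0 n i j hi hj]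
      exact ⟨fun hp => (tsG_base a _ i j (by omega)).symm, fun _ => rfl⟩
    have hloop := tsLoopK n a (n - 2).toNat 2 (by omega) rfl
      ((PySem.List.pyRange 0 n 1).map (fun _ => List.replicate (n + 1).toNat (0 : Int)))
      (tsShape_dp0 n) hbase
    rw [show (2 : Int) + 1 = 3 by norm_num] at hloop
    unfold max_triangle_score
    rw [(hloop 0 n (by omega) (by omega)).1 ⟨⟨by omega, by omega, by omega, by omega⟩, by omega⟩,
        tsSolve_top n a (by omega)]
    congr 1
    omega

-- ===== VERDICT (by name: the statement is the Claim_ definition above) =====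
theorem max_triangle_score_spec : Claim_equal_max_triangle_score := by
  intro n a _ hpre
  unfold Spec_max_triangle_score
  exact main_equiv n a hpre.1
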